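-- pv_equiv track=rewrite | github.com/alegrar/algorithm_prac | programmers/greedy4.py | solution
-- ===== SOURCE A (Python) =====
-- from collections import deque
--
-- def solution(people, limit):
--     answer = 0
--     people.sort(reverse=True)
--     people = deque(people)
--     rescue_lst = []
--     while people:
--         max_person = people.popleft()
--         rescue_lst = [max_person]
--
--         while people :
--             residual = limit - sum(rescue_lst)
--             min_person = people.pop()
--             if residual >= min_person:
--                 rescue_lst.append(min_person)
--             else :
--                 people.append(min_person)
--                 break
--
--         answer += 1
--
--     return answer
-- ===== SOURCE B (Python) =====
-- def solution(people, limit):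
--     people = sorted(people)
--     i, j = 0, len(people) - 1
--     boats = 0
--     while i <= j:
--         cap = limit - people[j]
--         j -= 1
--         while i <= j and people[i] <= cap:
--             cap -= people[i]
--             i += 1
--         boats += 1
--     return boats
-- ===== Notes on version B (the rewrite author's own statement) =====
-- stated objective: faster
-- what changed: Replaced the deque-with-rebuilt-boat-list loop (which re-sums the boat list with sum() on every pick) by a two-pointer scan over the ascending sorted list with an incrementally maintained remaining capacity.
import Mathlib
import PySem

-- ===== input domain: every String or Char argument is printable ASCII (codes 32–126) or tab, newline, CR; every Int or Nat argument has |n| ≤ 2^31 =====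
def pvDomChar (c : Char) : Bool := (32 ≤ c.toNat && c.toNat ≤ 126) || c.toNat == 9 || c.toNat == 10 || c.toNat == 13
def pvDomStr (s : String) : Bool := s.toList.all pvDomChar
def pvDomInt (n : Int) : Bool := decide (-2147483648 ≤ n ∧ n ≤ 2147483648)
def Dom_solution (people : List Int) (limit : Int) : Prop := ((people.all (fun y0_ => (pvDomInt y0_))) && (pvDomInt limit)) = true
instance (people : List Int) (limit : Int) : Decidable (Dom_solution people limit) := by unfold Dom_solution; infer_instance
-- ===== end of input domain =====

-- B replaces A's deque loop, which re-sums the boat list with sum() on every pick, by a two-pointer scan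
-- over the ascending sorted list with an incrementally maintained remaining capacity.
-- A sorts `people` in place, B does not mutate it; the equivalence proved here is about the return value.
-- Loops are ported as fuel-guarded structural recursion; the fuel passed at each call site is an upper
-- bound on the Python loop's iteration count, so the ports compute exactly what their Pythons compute.

-- ===== PORT A =====
-- inner while-loop of A: pop the lightest person from the right end while it fits; on break push it back
def solAInner (limit : Int) (fuel : Nat) (ps rescue : List Int) : List Int :=
  match fuel with
  | 0 => ps
  | fuel + 1 =>
    if h : ps = [] then []
    else
      let m := ps.getLast h
      if limit - rescue.sum ≥ m then solAInner limit fuel ps.dropLast (rescue ++ [m])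
      else ps

def solAOuter (limit : Int) (fuel : Nat) (ps : List Int) (answer : Int) : Int :=
  match fuel with
  | 0 => answer
  | fuel + 1 =>
    match ps with
    | [] => answer
    | h :: t => solAOuter limit fuel (solAInner limit t.length t [h]) (answer + 1)

def solution (people : List Int) (limit : Int) : Int :=
  let d := PySem.List.sorted people (fun x => x) true
  solAOuter limit d.length d 0

-- ===== PORT B =====
-- inner while-loop of B: advance i while the lightest remaining person fits into the running capacity
def solBInner (s : List Int) (fuel : Nat) (i j cap : Int) : Int :=
  match fuel with
  | 0 => i
  | fuel + 1 =>
    if i ≤ j ∧ s.getD i.toNat 0 ≤ cap then solBInner s fuel (i + 1) j (cap - s.getD i.toNat 0)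
    else i

def solBLoop (s : List Int) (limit : Int) (fuel : Nat) (i j boats : Int) : Int :=
  match fuel with
  | 0 => boats
  | fuel + 1 =>
    if i ≤ j then
      solBLoop s limit fuel (solBInner s (j - i).toNat i (j - 1) (limit - s.getD j.toNat 0)) (j - 1)
        (boats + 1)
    else boats

def solution_alt (people : List Int) (limit : Int) : Int :=
  let s := PySem.List.sorted people (fun x => x) false
  solBLoop s limit s.length 0 ((s.length : Int) - 1) 0

-- ===== PRECONDITION & SPEC =====
def Spec_solution (people : List Int) (limit : Int) (out : Int) : Prop := out = solution_alt people limit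
instance (people : List Int) (limit : Int) (out : Int) : Decidable (Spec_solution people limit out) := by unfold Spec_solution; infer_instance

-- ===== CLAIM (what is proved, stated in full; the proofs are below) =====
def Claim_equal_solution : Prop := ∀ (people : List Int) (limit : Int), Dom_solution people limit → Spec_solution people limit (solution people limit)

-- ===== LEMMAS AND PROOFS =====
-- the common abstraction: from an ascending list, greedily eat the prefix that fits into cap;
-- `gcount` is the boat count of the greedy on an ascending list, `seg s i j` is the segment s[i..j]
-- that B's index pair still holds.  A computes gcount of the ascending list via innerA_eq/outerA_eq
-- (its reversed deque is the ascending list read backwards); B computes it via solBInner_eq/solBLoop_eq.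
def eatPrefix (cap : Int) : List Int → List Int
  | [] => []
  | x :: xs => if x ≤ cap then eatPrefix (cap - x) xs else x :: xs

theorem eatPrefix_length_le (cap : Int) (l : List Int) : (eatPrefix cap l).length ≤ l.length := by
  induction l generalizing cap with
  | nil => simp [eatPrefix]
  | cons x xs ih =>
      simp only [eatPrefix]
      split
      · exact (ih _).trans (by simp)
      · exact le_rfl

theorem eatPrefix_eq_drop (cap : Int) (l : List Int) :
    ∃ k, k ≤ l.length ∧ eatPrefix cap l = l.drop k := by
  induction l generalizing cap with
  | nil => exact ⟨0, by simp [eatPrefix]⟩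
  | cons x xs ih =>
      simp only [eatPrefix]
      split
      · obtain ⟨k, hk, he⟩ := ih (cap - x)
        exact ⟨k + 1, by simpa using hk, by simpa using he⟩
      · exact ⟨0, by simp⟩

def gcount (limit : Int) (l : List Int) : Int :=
  if h : l = [] then 0
  else 1 + gcount limit (eatPrefix (limit - l.getLast h) l.dropLast)
termination_by l.length
decreasing_by
  have h1 := eatPrefix_length_le (limit - l.getLast h) l.dropLast
  have h2 : 0 < l.length := List.length_pos_iff.mpr h
  simp [List.length_dropLast] at h1 ⊢
  omega

theorem innerA_eq (limit : Int) (l rescue : List Int) (fuel : Nat) (hf : l.length ≤ fuel) :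
    solAInner limit fuel l.reverse rescue = (eatPrefix (limit - rescue.sum) l).reverse := by
  induction l generalizing rescue fuel with
  | nil =>
      cases fuel <;> simp [solAInner, eatPrefix]
  | cons x xs ih =>
      match fuel with
      | 0 => simp at hf
      | fuel + 1 =>
        rw [solAInner]
        rw [dif_neg (by simp : ¬ (x :: xs).reverse = [])]
        simp only [List.reverse_cons, List.getLast_concat, List.dropLast_concat, eatPrefix]
        by_cases hc : x ≤ limit - rescue.sum
        · rw [if_pos (by omega), if_pos hc]
          rw [ih (rescue ++ [x]) fuel (by simpa using hf)]
          have : limit - (rescue ++ [x]).sum = limit - rescue.sum - x := by simp; ring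
          rw [this]
        · rw [if_neg (by omega), if_neg hc]
          simp

theorem outerA_eq (limit : Int) :
    ∀ (fuel : Nat) (l : List Int), l.length ≤ fuel → ∀ a,
      solAOuter limit fuel l.reverse a = a + gcount limit l := by
  intro fuel
  induction fuel with
  | zero =>
      intro l hl a
      have : l = [] := List.eq_nil_of_length_eq_zero (by omega)
      subst this
      simp [solAOuter, gcount]
  | succ n ih =>
      intro l hl a
      by_cases h : l = []
      · subst h; simp [solAOuter, gcount]
      · conv_lhs => rw [← List.dropLast_concat_getLast h]
        rw [List.reverse_concat]
        rw [solAOuter]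
        rw [innerA_eq limit l.dropLast [l.getLast h] _ (by simp)]
        have hsum : limit - (List.sum [l.getLast h]) = limit - l.getLast h := by simp
        rw [hsum]
        rw [ih _ ((eatPrefix_length_le _ _).trans (by simp [List.length_dropLast]; omega))]
        conv_rhs => rw [gcount]
        rw [dif_neg h]
        ring

def seg (s : List Int) (i j : Int) : List Int := (s.drop i.toNat).take (j - i + 1).toNat

theorem seg_nil {s : List Int} {i j : Int} (h : j + 1 ≤ i) : seg s i j = [] := by
  have : (j - i + 1).toNat = 0 := by omega
  simp [seg, this]

theorem seg_len {s : List Int} {i j : Int} (h0 : 0 ≤ i) (hj : j < (s.length : Int)) :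
    (seg s i j).length = (j - i + 1).toNat := by
  simp only [seg, List.length_take, List.length_drop]
  omega

theorem seg_cons {s : List Int} {i j : Int} (h0 : 0 ≤ i) (hij : i ≤ j) (hj : j < (s.length : Int)) :
    seg s i j = s.getD i.toNat 0 :: seg s (i + 1) j := by
  have hlt : i.toNat < s.length := by omega
  unfold seg
  rw [List.drop_eq_getElem_cons hlt]
  have h1 : (j - i + 1).toNat = (j - (i + 1) + 1).toNat + 1 := by omega
  have h2 : (i + 1).toNat = i.toNat + 1 := by omega
  rw [h1, h2, List.take_succ_cons, List.getD_eq_getElem _ _ hlt]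

theorem seg_snoc {s : List Int} {i j : Int} (h0 : 0 ≤ i) (hij : i ≤ j) (hj : j < (s.length : Int)) :
    seg s i j = seg s i (j - 1) ++ [s.getD j.toNat 0] := by
  unfold seg
  have h1 : (j - i + 1).toNat = (j - 1 - i + 1).toNat + 1 := by omega
  have hjl : j.toNat < s.length := by omega
  have h2 : i.toNat + (j - 1 - i + 1).toNat = j.toNat := by omega
  have h3 : (s.drop i.toNat)[(j - 1 - i + 1).toNat]? = some (s.getD j.toNat 0) := by
    rw [List.getElem?_drop, h2, List.getElem?_eq_getElem hjl, List.getD_eq_getElem _ _ hjl]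
  rw [h1, List.take_add_one, h3]
  simp

theorem seg_drop {s : List Int} {i j : Int} (k : Nat) (h0 : 0 ≤ i) (hk : (k : Int) ≤ j + 1 - i) :
    (seg s i j).drop k = seg s (i + k) j := by
  unfold seg
  rw [List.drop_take, List.drop_drop]
  have h1 : (j - i + 1).toNat - k = (j - (i + k) + 1).toNat := by omega
  have h2 : i.toNat + k = (i + k).toNat := by omega
  rw [h1, h2]

theorem solBInner_eq (s : List Int) :
    ∀ (fuel : Nat) (i cap j : Int), 0 ≤ i → i ≤ j + 1 → j < (s.length : Int) →
      (j + 1 - i).toNat ≤ fuel →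
      solBInner s fuel i j cap = j + 1 - ((eatPrefix cap (seg s i j)).length : Int) := by
  intro fuel
  induction fuel with
  | zero =>
      intro i cap j h0 h1 h2 h3
      have hij : i = j + 1 := by omega
      rw [seg_nil (by omega), solBInner]
      simp [eatPrefix, hij]
  | succ n ih =>
      intro i cap j h0 h1 h2 h3
      by_cases hij : i ≤ j
      · rw [seg_cons h0 hij h2]
        rw [solBInner]
        by_cases hc : s.getD i.toNat 0 ≤ cap
        · rw [if_pos ⟨hij, hc⟩]
          rw [ih (i + 1) (cap - s.getD i.toNat 0) j (by omega) (by omega) h2 (by omega)]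
          simp only [eatPrefix]
          rw [if_pos hc]
        · rw [if_neg (by tauto)]
          simp only [eatPrefix]
          rw [if_neg hc]
          have hlen : (seg s (i + 1) j).length = (j - (i + 1) + 1).toNat := seg_len (by omega) h2
          simp only [List.length_cons, hlen]
          omega
      · have hij' : i = j + 1 := by omega
        rw [seg_nil (by omega), solBInner, if_neg (by omega)]
        simp [eatPrefix, hij']

theorem solBLoop_eq (s : List Int) (limit : Int) :
    ∀ (fuel : Nat) (i j boats : Int), 0 ≤ i → i ≤ j + 1 → j < (s.length : Int) →
      (j + 1 - i).toNat ≤ fuel →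
      solBLoop s limit fuel i j boats = boats + gcount limit (seg s i j) := by
  intro fuel
  induction fuel with
  | zero =>
      intro i j boats h0 h1 h2 h3
      rw [seg_nil (by omega), solBLoop, gcount]
      simp
  | succ n ih =>
      intro i j boats h0 h1 h2 h3
      by_cases hij : i ≤ j
      · rw [solBLoop, if_pos hij]
        set cap := limit - s.getD j.toNat 0 with hcap
        obtain ⟨k, hk, he⟩ := eatPrefix_eq_drop cap (seg s i (j - 1))
        have hlen1 : (seg s i (j - 1)).length = (j - i).toNat := by
          rw [seg_len h0 (by omega)]; congr 1; omega
        have he2 : eatPrefix cap (seg s i (j - 1)) = seg s (i + k) (j - 1) := by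
          rw [he, seg_drop k h0 (by omega)]
        have hlen2 : (eatPrefix cap (seg s i (j - 1))).length = (j - (i + k)).toNat := by
          rw [he2, seg_len (by omega) (by omega)]; congr 1; omega
        rw [hlen1] at hk
        have hi' : solBInner s (j - i).toNat i (j - 1) cap = i + k := by
          rw [solBInner_eq s (j - i).toNat i cap (j - 1) h0 (by omega) (by omega) (by omega),
            hlen2]
          omega
        rw [hi']
        rw [ih (i + k) (j - 1) (boats + 1) (by omega) (by omega) (by omega) (by omega)]
        have hsnoc := seg_snoc h0 hij h2
        have hR : gcount limit (seg s i j) = 1 + gcount limit (seg s (i + (k : Int)) (j - 1)) := by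
          rw [hsnoc]
          conv_lhs => rw [gcount]
          rw [dif_neg (List.append_ne_nil_of_right_ne_nil _ (List.cons_ne_nil _ _)),
            List.getLast_concat, List.dropLast_concat, ← hcap, he2]
        rw [hR]
        ring
      · rw [solBLoop, if_neg hij, seg_nil (by omega), gcount]
        simp

theorem sorted_rev_eq_reverse (xs : List Int) :
    PySem.List.sorted xs (fun x => x) true = (PySem.List.sorted xs (fun x => x) false).reverse := by
  have hperm : (PySem.List.sorted xs (fun x => x) true).Perm
      ((PySem.List.sorted xs (fun x => x) false).reverse) :=
    (PySem.List.sorted_perm xs (fun x => x) true).trans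
      ((PySem.List.sorted_perm xs (fun x => x) false).symm.trans
        (PySem.List.sorted xs (fun x => x) false).reverse_perm.symm)
  have h1 : (PySem.List.sorted xs (fun x => x) true).Pairwise (fun a b : Int => b ≤ a) :=
    PySem.List.sorted_pairwise_rev xs (fun x => x)
  have h2 : ((PySem.List.sorted xs (fun x => x) false).reverse).Pairwise (fun a b : Int => b ≤ a) := by
    rw [List.pairwise_reverse]
    exact PySem.List.sorted_pairwise xs (fun x => x)
  exact List.Perm.eq_of_pairwise (fun a b _ _ hab hba => le_antisymm hba hab) h1 h2 hperm

theorem solution_eq_alt (people : List Int) (limit : Int) :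
    solution people limit = solution_alt people limit := by
  simp only [solution, solution_alt]
  rw [sorted_rev_eq_reverse]
  set s := PySem.List.sorted people (fun x => x) false with hs
  rw [List.length_reverse]
  rw [outerA_eq limit s.length s le_rfl 0]
  rw [solBLoop_eq s limit s.length 0 ((s.length : Int) - 1) 0 le_rfl (by omega) (by omega)
    (by omega)]
  have hseg : seg s 0 ((s.length : Int) - 1) = s := by
    unfold seg
    simp
  rw [hseg]

-- ===== VERDICT (by name: the statement is the Claim_ definition above) =====
theorem solution_spec : Claim_equal_solution := by
  intro people limit _
  exact solution_eq_alt people limit
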